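-- pv_equiv track=rewrite | github.com/swardiantara/drone-huspm | main.py | contains_pattern
-- ===== SOURCE A (Python) =====
-- from collections import defaultdict, Counter
--
-- def contains_pattern(sequence, pattern):
--     """
--     Check if a sequence contains a pattern (while handling duplicates properly).
--
--     Args:
--         sequence (list): A sequence (list of itemsets)
--         pattern (list): A pattern (list of itemsets)
--
--     Returns:
--         bool: True if the sequence contains the pattern, False otherwise
--     """
--     if not pattern:
--         return True
--
--     if not sequence:
--         return False
--
--     # Try to find the first itemset of the pattern
--     for i, itemset in enumerate(sequence):
--         if contains_itemset(itemset, pattern[0]):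
--             # If this is the last itemset in the pattern, we're done
--             if len(pattern) == 1:
--                 return True
--
--             # Otherwise, look for the rest of the pattern in the remainder of the sequence
--             if contains_pattern(sequence[i+1:], pattern[1:]):
--                 return True
--
--     return False
--
-- def contains_itemset(itemset, pattern_itemset):
--     """
--     Check if an itemset contains a pattern itemset (handling duplicates).
--
--     Args:
--         itemset (list): An itemset (list of (event_id, utility) tuples)
--         pattern_itemset (list): A pattern itemset
--
--     Returns:
--         bool: True if the itemset contains the pattern itemset, False otherwise
--     """
--     # Extract just the event IDs from both itemsets
--     itemset_events = [event for event, _ in itemset]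
--     pattern_events = [event for event, _ in pattern_itemset]
--
--     # Check if all pattern events appear in the itemset with the right frequencies
--     itemset_counter = Counter(itemset_events)
--     pattern_counter = Counter(pattern_events)
--
--     for event, count in pattern_counter.items():
--         if itemset_counter.get(event, 0) < count:
--             return False
--
--     return True
-- ===== SOURCE B (Python) =====
-- def contains_pattern(sequence, pattern):
--     """Greedy single-pass subsequence check: for each pattern itemset take the
--     earliest remaining sequence itemset that covers it."""
--     pos = 0
--     for pits in pattern:
--         pe = [e for e, _ in pits]
--         while pos < len(sequence):
--             ie = [e for e, _ in sequence[pos]]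
--             pos += 1
--             if all(pe.count(e) <= ie.count(e) for e in pe):
--                 break
--         else:
--             return False
--     return True
-- ===== Notes on version B (the rewrite author's own statement) =====
-- stated objective: faster
-- what changed: Replaced A's backtracking recursion with slicing (retrying every possible match position for each pattern itemset) by a greedy single left-to-right pass that always takes the earliest covering itemset, which is complete for subsequence matching.
import Mathlib
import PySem

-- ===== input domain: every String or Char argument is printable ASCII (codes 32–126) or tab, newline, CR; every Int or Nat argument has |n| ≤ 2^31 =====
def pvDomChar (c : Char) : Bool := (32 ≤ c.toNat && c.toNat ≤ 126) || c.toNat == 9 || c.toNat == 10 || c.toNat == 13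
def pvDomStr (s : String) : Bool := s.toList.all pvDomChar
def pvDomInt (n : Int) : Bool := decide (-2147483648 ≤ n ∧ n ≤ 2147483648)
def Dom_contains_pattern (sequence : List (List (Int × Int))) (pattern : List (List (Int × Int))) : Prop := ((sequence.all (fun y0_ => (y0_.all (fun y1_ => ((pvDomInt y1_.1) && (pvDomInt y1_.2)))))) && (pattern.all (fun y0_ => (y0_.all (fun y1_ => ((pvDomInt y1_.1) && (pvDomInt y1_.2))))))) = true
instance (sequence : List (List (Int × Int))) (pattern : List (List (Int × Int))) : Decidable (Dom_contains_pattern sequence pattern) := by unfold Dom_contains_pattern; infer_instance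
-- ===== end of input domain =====

-- B replaces A's backtracking recursion over all match positions by a greedy
-- single pass taking the earliest covering itemset (avoids A's worst-case blowup).

-- ===== PORT A =====
-- literal port of contains_itemset: Counter-based frequency check with early False
def containsItemset (itemset : List (Int × Int)) (pattern_itemset : List (Int × Int)) : Bool :=
  let itemset_events := itemset.map (fun p => p.1)
  let pattern_events := pattern_itemset.map (fun p => p.1)
  let itemset_counter := PySem.Dict.counter itemset_events
  let pattern_counter := PySem.Dict.counter pattern_events
  pattern_counter.items.all (fun ec => !(itemset_counter.getD ec.1 0 < ec.2))

-- literal port of A: the for-loop over `sequence` with slices `sequence[i+1:]`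
-- is the structural recursion on `sequence`; branch order preserved.
def contains_pattern (sequence : List (List (Int × Int))) (pattern : List (List (Int × Int))) : Bool :=
  match pattern with
  | [] => true
  | p0 :: prest =>
    match sequence with
    | [] => false
    | x :: rest =>
      if containsItemset x p0 then
        (if prest.isEmpty then true
         else if contains_pattern rest prest then true
         else contains_pattern rest (p0 :: prest))
      else contains_pattern rest (p0 :: prest)

-- ===== PORT B =====
-- Source B's coverage test: counts compared directly on the event lists
def cpCovers (itemset : List (Int × Int)) (pitemset : List (Int × Int)) : Bool :=
  let ie := itemset.map (fun p => p.1)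
  let pe := pitemset.map (fun p => p.1)
  pe.all (fun e => decide (pe.count e ≤ ie.count e))

-- Source B's inner while loop: consume sequence until the first covering itemset
def cpFindMatch (p : List (Int × Int)) : List (List (Int × Int)) → Option (List (List (Int × Int)))
  | [] => none
  | x :: rest => if cpCovers x p then some rest else cpFindMatch p rest

def contains_pattern_alt (sequence : List (List (Int × Int))) (pattern : List (List (Int × Int))) : Bool :=
  match pattern with
  | [] => true
  | p :: ps =>
    match cpFindMatch p sequence with
    | none => false
    | some rest => contains_pattern_alt rest ps

-- ===== PRECONDITION & SPEC =====
def Spec_contains_pattern (sequence : List (List (Int × Int))) (pattern : List (List (Int × Int))) (out : Bool) : Prop := out = contains_pattern_alt sequence pattern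
instance (sequence : List (List (Int × Int))) (pattern : List (List (Int × Int))) (out : Bool) : Decidable (Spec_contains_pattern sequence pattern out) := by unfold Spec_contains_pattern; infer_instance

-- ===== CLAIM (what is proved, stated in full; the proofs are below) =====
def Claim_equal_contains_pattern : Prop := ∀ (sequence : List (List (Int × Int))) (pattern : List (List (Int × Int))), Dom_contains_pattern sequence pattern → Spec_contains_pattern sequence pattern (contains_pattern sequence pattern)

-- ===== LEMMAS AND PROOFS =====

-- the two itemset-containment tests agree
theorem covers_eq (x p : List (Int × Int)) : containsItemset x p = cpCovers x p := by
  rw [Bool.eq_iff_iff]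
  simp [containsItemset, cpCovers, PySem.Dict.items_counter, PySem.Dict.getD_counter,
    List.all_eq_true, PySem.Set.mem_ofList]

-- unfolding of B's port on a cons/cons input
theorem alt_cons_cons (x : List (Int × Int)) (rest : List (List (Int × Int)))
    (p : List (Int × Int)) (ps : List (List (Int × Int))) :
    contains_pattern_alt (x :: rest) (p :: ps) =
      (if cpCovers x p then contains_pattern_alt rest ps
       else contains_pattern_alt rest (p :: ps)) := by
  by_cases h : cpCovers x p = true <;>
    simp [contains_pattern_alt, cpFindMatch, h]

-- dropping the first pattern itemset preserves matchability (greedy completeness core)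
theorem alt_mono (seq : List (List (Int × Int))) :
    ∀ (p : List (Int × Int)) (ps : List (List (Int × Int))),
      contains_pattern_alt seq (p :: ps) = true → contains_pattern_alt seq ps = true := by
  induction seq with
  | nil => intro p ps h; simp [contains_pattern_alt, cpFindMatch] at h
  | cons x rest ih =>
    intro p ps h
    rw [alt_cons_cons] at h
    cases ps with
    | nil => simp [contains_pattern_alt]
    | cons q qs =>
      rw [alt_cons_cons]
      by_cases hp : cpCovers x p = true <;> simp [hp] at h
      · by_cases hq : cpCovers x q = true <;> simp [hq]
        · exact ih q qs h
        · exact h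
      · by_cases hq : cpCovers x q = true <;> simp [hq]
        · exact ih q qs (ih p (q :: qs) h)
        · exact ih p (q :: qs) h

-- the backtracking search and the greedy pass compute the same answer
theorem main_eq (seq : List (List (Int × Int))) :
    ∀ pat, contains_pattern seq pat = contains_pattern_alt seq pat := by
  induction seq with
  | nil =>
    intro pat
    cases pat <;> simp [contains_pattern, contains_pattern_alt, cpFindMatch]
  | cons x rest ih =>
    intro pat
    cases pat with
    | nil => simp [contains_pattern, contains_pattern_alt]
    | cons p ps =>
      rw [alt_cons_cons]
      show (if containsItemset x p then _ else _) = _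
      rw [covers_eq]
      by_cases hc : cpCovers x p = true <;> simp [hc]
      · cases ps with
        | nil => simp [contains_pattern_alt]
        | cons q qs =>
          rw [ih, ih]
          by_cases h1 : contains_pattern_alt rest (q :: qs) = true <;> simp [h1]
          cases h2 : contains_pattern_alt rest (p :: q :: qs) with
          | true => exact absurd (alt_mono rest p (q :: qs) h2) h1
          | false => rfl
      · exact ih (p :: ps)

-- ===== VERDICT (by name: the statement is the Claim_ definition above) =====
theorem contains_pattern_spec : Claim_equal_contains_pattern := by
  intro seq pat _
  unfold Spec_contains_pattern
  exact main_eq seq pat
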